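-- pv_equiv track=rewrite | github.com/darkfennertrader/algo-trader | algo_trader/domain/asset_blocks.py | build_asset_block_index_map
-- ===== SOURCE A (Python) =====
-- from typing import Sequence
--
-- FX_CLASS_ID = 0
--
-- INDEX_CLASS_ID = 1
--
-- COMMODITY_CLASS_ID = 2
--
-- FULL_BLOCK = "full"
--
-- FX_BLOCK = "fx"
--
-- INDICES_BLOCK = "indices"
--
-- COMMODITIES_BLOCK = "commodities"
--
-- def classify_asset_name(name: str) -> int:
--     normalized = str(name).strip().upper()
--     if _is_commodity_name(normalized):
--         return COMMODITY_CLASS_ID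
--     if _is_fx_name(normalized):
--         return FX_CLASS_ID
--     return INDEX_CLASS_ID
--
-- def build_asset_block_index_map(
--     asset_names: Sequence[str],
-- ) -> dict[str, tuple[int, ...]]:
--     fx: list[int] = []
--     indices: list[int] = []
--     commodities: list[int] = []
--     for idx, asset_name in enumerate(asset_names):
--         class_id = classify_asset_name(asset_name)
--         if class_id == FX_CLASS_ID:
--             fx.append(idx)
--         elif class_id == INDEX_CLASS_ID:
--             indices.append(idx)
--         else:
--             commodities.append(idx)
--     return {
--         FX_BLOCK: tuple(fx),
--         INDICES_BLOCK: tuple(indices),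
--         COMMODITIES_BLOCK: tuple(commodities),
--         FULL_BLOCK: tuple(range(len(asset_names))),
--     }
--
-- def _is_fx_name(name: str) -> bool:
--     parts = name.split(".")
--     return len(parts) == 2 and all(len(part) == 3 and part.isalpha() for part in parts)
--
-- def _is_commodity_name(name: str) -> bool:
--     return name.startswith(("XAU", "XAG", "XPT", "XPD"))
-- ===== SOURCE B (Python) =====
-- FX_CLASS_ID = 0
-- INDEX_CLASS_ID = 1
-- COMMODITY_CLASS_ID = 2
-- FULL_BLOCK = "full"
-- FX_BLOCK = "fx"
-- INDICES_BLOCK = "indices"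
-- COMMODITIES_BLOCK = "commodities"
--
--
-- def _is_fx_name(name):
--     parts = name.split(".")
--     return len(parts) == 2 and all(len(p) == 3 and p.isalpha() for p in parts)
--
--
-- def _is_commodity_name(name):
--     return name.startswith(("XAU", "XAG", "XPT", "XPD"))
--
--
-- def classify_asset_name(name):
--     normalized = str(name).strip().upper()
--     if _is_commodity_name(normalized):
--         return COMMODITY_CLASS_ID
--     if _is_fx_name(normalized):
--         return FX_CLASS_ID
--     return INDEX_CLASS_ID
--
--
-- def build_asset_block_index_map(asset_names):
--     classes = [classify_asset_name(n) for n in asset_names]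
--     return {
--         FX_BLOCK: tuple(i for i, c in enumerate(classes) if c == FX_CLASS_ID),
--         INDICES_BLOCK: tuple(i for i, c in enumerate(classes) if c == INDEX_CLASS_ID),
--         COMMODITIES_BLOCK: tuple(i for i, c in enumerate(classes) if c == COMMODITY_CLASS_ID),
--         FULL_BLOCK: tuple(range(len(asset_names))),
--     }
-- ===== Notes on version B (the rewrite author's own statement) =====
-- stated objective: alternative
-- what changed: Replaces the single enumerate loop with three mutable accumulator lists and if/elif/else branching by one classification pass followed by three independent filtering comprehensions, one per block.
import Mathlib
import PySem

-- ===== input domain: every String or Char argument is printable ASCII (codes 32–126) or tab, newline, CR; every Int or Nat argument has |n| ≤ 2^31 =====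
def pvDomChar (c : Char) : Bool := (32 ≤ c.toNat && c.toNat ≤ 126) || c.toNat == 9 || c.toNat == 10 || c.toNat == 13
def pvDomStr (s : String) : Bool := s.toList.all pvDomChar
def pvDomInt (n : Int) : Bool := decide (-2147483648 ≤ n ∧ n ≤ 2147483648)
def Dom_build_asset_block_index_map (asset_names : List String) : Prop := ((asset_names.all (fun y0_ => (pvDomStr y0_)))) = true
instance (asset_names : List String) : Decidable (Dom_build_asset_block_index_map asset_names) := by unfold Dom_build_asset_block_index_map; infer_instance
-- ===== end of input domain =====

-- B replaces A's single loop over three mutable accumulator lists (if/elif/else) by one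
-- classification pass followed by three independent filtering comprehensions (objective: alternative).

-- shared module helpers (used verbatim by both Pythons)
def pvIsFxName (name : String) : Bool :=
  let parts := PySem.Chars.splitOn name.toList ['.']
  (parts.length == 2) && parts.all (fun p => (p.length == 3) && PySem.Chars.strIsalpha p)

def pvIsCommodityName (name : String) : Bool :=
  PySem.Str.startswith name "XAU" || PySem.Str.startswith name "XAG" ||
  PySem.Str.startswith name "XPT" || PySem.Str.startswith name "XPD"

def classify_asset_name (name : String) : Int :=
  let normalized := PySem.Str.upper (PySem.Str.strip name)
  if pvIsCommodityName normalized then 2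
  else if pvIsFxName normalized then 0
  else 1

-- ===== PORT A =====
-- the loop body: append idx to fx / indices / commodities according to class_id
def pvStep (acc : List Int × List Int × List Int) (p : Int × String) : List Int × List Int × List Int :=
  let class_id := classify_asset_name p.2
  if class_id = 0 then (acc.1 ++ [p.1], acc.2.1, acc.2.2)
  else if class_id = 1 then (acc.1, acc.2.1 ++ [p.1], acc.2.2)
  else (acc.1, acc.2.1, acc.2.2 ++ [p.1])

def build_asset_block_index_map (asset_names : List String) : List (String × List Int) :=
  let acc := (PySem.List.enumerate asset_names).foldl pvStep ([], [], [])
  [("fx", acc.1), ("indices", acc.2.1), ("commodities", acc.2.2),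
   ("full", PySem.List.pyRange 0 (PySem.List.len asset_names) 1)]

-- ===== PORT B =====
def build_asset_block_index_map_alt (asset_names : List String) : List (String × List Int) :=
  let classes := asset_names.map classify_asset_name
  [("fx", (PySem.List.enumerate classes).filterMap (fun p => if p.2 = 0 then some p.1 else none)),
   ("indices", (PySem.List.enumerate classes).filterMap (fun p => if p.2 = 1 then some p.1 else none)),
   ("commodities", (PySem.List.enumerate classes).filterMap (fun p => if p.2 = 2 then some p.1 else none)),
   ("full", PySem.List.pyRange 0 (PySem.List.len asset_names) 1)]

-- ===== PRECONDITION & SPEC =====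
def Spec_build_asset_block_index_map (asset_names : List String) (out : List (String × List Int)) : Prop := out = build_asset_block_index_map_alt asset_names
instance (asset_names : List String) (out : List (String × List Int)) : Decidable (Spec_build_asset_block_index_map asset_names out) := by unfold Spec_build_asset_block_index_map; infer_instance

-- ===== CLAIM (what is proved, stated in full; the proofs are below) =====
def Claim_equal_build_asset_block_index_map : Prop := ∀ (asset_names : List String), Dom_build_asset_block_index_map asset_names → Spec_build_asset_block_index_map asset_names (build_asset_block_index_map asset_names)

-- ===== LEMMAS AND PROOFS =====

-- classify_asset_name only takes the values 0, 1, 2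
lemma classify_cases (n : String) :
    classify_asset_name n = 0 ∨ classify_asset_name n = 1 ∨ classify_asset_name n = 2 := by
  unfold classify_asset_name
  by_cases h1 : pvIsCommodityName (PySem.Str.upper (PySem.Str.strip n)) = true <;>
    by_cases h2 : pvIsFxName (PySem.Str.upper (PySem.Str.strip n)) = true <;>
      simp [h1, h2]

-- filtering the enumerated class list = filtering the enumerated names by their class
lemma filt (g : String → Int) (xs : List String) (s k : Int) :
    (PySem.List.enumerate (xs.map g) s).filterMap
      (fun p => if p.2 = k then some p.1 else none)
    = (PySem.List.enumerate xs s).filterMap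
      (fun p => if g p.2 = k then some p.1 else none) := by
  induction xs generalizing s with
  | nil => rfl
  | cons x xs ih =>
    simp only [List.map_cons, PySem.List.enumerate_cons, List.filterMap_cons]
    by_cases h : g x = k <;> simp [h, ih]

-- A's three-accumulator loop computes the three filters, appended to the start state
lemma loop_eq (l : List (Int × String)) (a b c : List Int) :
    l.foldl pvStep (a, b, c)
    = (a ++ l.filterMap (fun p => if classify_asset_name p.2 = 0 then some p.1 else none),
       b ++ l.filterMap (fun p => if classify_asset_name p.2 = 1 then some p.1 else none),
       c ++ l.filterMap (fun p => if classify_asset_name p.2 = 2 then some p.1 else none)) := by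
  induction l generalizing a b c with
  | nil => simp
  | cons p l ih =>
    rcases classify_cases p.2 with h | h | h <;>
      simp [pvStep, List.foldl_cons, h, ih]

-- ===== VERDICT (by name: the statement is the Claim_ definition above) =====
theorem build_asset_block_index_map_spec : Claim_equal_build_asset_block_index_map := by
  intro asset_names _
  show build_asset_block_index_map asset_names = build_asset_block_index_map_alt asset_names
  simp only [build_asset_block_index_map, build_asset_block_index_map_alt]
  rw [loop_eq, filt, filt, filt]
  simp only [List.nil_append]
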